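-- pv_equiv track=rewrite | github.com/FranOri1711/KuvaCalculator | kuva.py | calculate_kuva_spent
-- ===== SOURCE A (Python) =====
-- KUVA_COST = [900, 1000, 1200, 1400, 1700, 2000, 2350, 2750, 3150]
--
-- MAX_COST = 3500  # After 9th roll
--
-- def calculate_kuva_spent(rolls):
--     total_kuva = 0
--     for i in range(rolls):
--         if i < len(KUVA_COST):
--             total_kuva += KUVA_COST[i]
--         else:
--             total_kuva += MAX_COST  # 3500 from here
--     return total_kuva
-- ===== SOURCE B (Python) =====
-- KUVA_COST = [900, 1000, 1200, 1400, 1700, 2000, 2350, 2750, 3150]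
--
-- MAX_COST = 3500
--
-- # prefix sums of KUVA_COST: _PREFIX[k] = sum of first k costs
-- _PREFIX = [0, 900, 1900, 3100, 4500, 6200, 8200, 10550, 13300, 16450]
--
-- def calculate_kuva_spent(rolls):
--     if rolls <= 0:
--         return 0
--     if rolls <= 9:
--         return _PREFIX[rolls]
--     return _PREFIX[9] + MAX_COST * (rolls - 9)
-- ===== Notes on version B (the rewrite author's own statement) =====
-- stated objective: faster
-- what changed: Replaced the per-roll accumulation loop by an O(1) closed form: a precomputed prefix-sum table for the escalating-cost rolls plus MAX_COST times the remaining capped rolls.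
import Mathlib
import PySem

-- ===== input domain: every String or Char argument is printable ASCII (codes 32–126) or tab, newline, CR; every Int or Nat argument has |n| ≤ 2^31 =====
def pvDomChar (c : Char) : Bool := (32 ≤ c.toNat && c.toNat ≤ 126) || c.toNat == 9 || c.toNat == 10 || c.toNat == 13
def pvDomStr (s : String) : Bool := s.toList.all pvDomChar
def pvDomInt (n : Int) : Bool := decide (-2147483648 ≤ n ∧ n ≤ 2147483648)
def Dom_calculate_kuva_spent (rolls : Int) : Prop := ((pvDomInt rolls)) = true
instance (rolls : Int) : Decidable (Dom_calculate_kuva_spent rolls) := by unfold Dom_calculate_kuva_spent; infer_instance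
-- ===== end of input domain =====

-- B replaces A's per-roll accumulation loop by an O(1) closed form (prefix-sum table + linear tail); objective: faster.

-- ===== PORT A =====
def KUVA_COST : List Int := [900, 1000, 1200, 1400, 1700, 2000, 2350, 2750, 3150]

def MAX_COST : Int := 3500

def calculate_kuva_spent (rolls : Int) : Int :=
  (PySem.List.pyRange 0 rolls 1).foldl
    (fun total_kuva i =>
      if i < (KUVA_COST.length : Int) then
        total_kuva + PySem.List.pyGetD KUVA_COST i 0
      else
        total_kuva + MAX_COST)
    0

-- ===== PORT B =====
-- prefix sums of KUVA_COST: PREFIX_B[k] = sum of first k costs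
def PREFIX_B : List Int := [0, 900, 1900, 3100, 4500, 6200, 8200, 10550, 13300, 16450]

def calculate_kuva_spent_alt (rolls : Int) : Int :=
  if rolls ≤ 0 then 0
  else if rolls ≤ 9 then PySem.List.pyGetD PREFIX_B rolls 0
  else PySem.List.pyGetD PREFIX_B 9 0 + MAX_COST * (rolls - 9)

-- ===== PRECONDITION & SPEC =====
def Spec_calculate_kuva_spent (rolls : Int) (out : Int) : Prop := out = calculate_kuva_spent_alt rolls
instance (rolls : Int) (out : Int) : Decidable (Spec_calculate_kuva_spent rolls out) := by unfold Spec_calculate_kuva_spent; infer_instance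

-- ===== CLAIM (what is proved, stated in full; the proofs are below) =====
def Claim_equal_calculate_kuva_spent : Prop := ∀ (rolls : Int), Dom_calculate_kuva_spent rolls → Spec_calculate_kuva_spent rolls (calculate_kuva_spent rolls)

-- ===== LEMMAS AND PROOFS =====

theorem kuva_A_succ (n : Nat) :
    calculate_kuva_spent ((n : Int) + 1) =
      calculate_kuva_spent (n : Int) +
        (if (n : Int) < 9 then PySem.List.pyGetD KUVA_COST (n : Int) 0 else MAX_COST) := by
  unfold calculate_kuva_spent
  rw [PySem.List.pyRange_one_succ_right (by exact_mod_cast Int.natCast_nonneg n)]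
  simp [List.foldl_append, KUVA_COST]
  split_ifs <;> rfl

theorem kuva_alt_succ (n : Nat) :
    calculate_kuva_spent_alt ((n : Int) + 1) =
      calculate_kuva_spent_alt (n : Int) +
        (if (n : Int) < 9 then PySem.List.pyGetD KUVA_COST (n : Int) 0 else MAX_COST) := by
  by_cases h : n < 10
  · interval_cases n <;> decide
  · push Not at h
    have h9 : ¬ ((n : Int) < 9) := by omega
    have h1 : ¬ ((n : Int) + 1 ≤ 0) := by omega
    have h2 : ¬ ((n : Int) + 1 ≤ 9) := by omega
    have h3 : ¬ ((n : Int) ≤ 0) := by omega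
    have h4 : ¬ ((n : Int) ≤ 9) := by omega
    simp only [calculate_kuva_spent_alt, if_neg h1, if_neg h2, if_neg h3, if_neg h4, if_neg h9]
    ring

theorem kuva_eq_nat (n : Nat) :
    calculate_kuva_spent (n : Int) = calculate_kuva_spent_alt (n : Int) := by
  induction n with
  | zero => decide
  | succ n ih =>
    have : ((n + 1 : Nat) : Int) = (n : Int) + 1 := by push_cast; ring
    rw [this, kuva_A_succ, kuva_alt_succ, ih]

-- ===== VERDICT (by name: the statement is the Claim_ definition above) =====
theorem calculate_kuva_spent_spec : Claim_equal_calculate_kuva_spent := by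
  intro rolls _
  unfold Spec_calculate_kuva_spent
  by_cases h : rolls ≤ 0
  · have hA : calculate_kuva_spent rolls = 0 := by
      unfold calculate_kuva_spent
      rw [PySem.List.pyRange_one_eq_nil h]
      rfl
    have hB : calculate_kuva_spent_alt rolls = 0 := by
      unfold calculate_kuva_spent_alt
      rw [if_pos h]
    rw [hA, hB]
  · push Not at h
    have : rolls = (rolls.toNat : Int) := by omega
    rw [this]
    exact kuva_eq_nat rolls.toNat
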